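-- pv_equiv track=rewrite | github.com/IlieAndreiVasile/Fundaments-of-Programming | lab2/complex.py | seq_real
-- ===== SOURCE A (Python) =====
-- def seq_real(l):
--     """
--     return the longest sequence of complex numbers with strictly increasing real part
--     input: l - the list
--     output: the longest sequence
--     """
--     i = 0
--     start = 0
--     max = 0
--     m1 = 0
--     while i < len(l) - 1:
--         if (l[i][0]) < (l[i + 1][0]):
--             m1 += 1
--         else:
--             if m1 > max:
--                 max = m1
--                 start = i - m1
--             m1 = 0
--         i += 1
--     if m1 > max:
--         max = m1
--         start = i - m1
--     if max == 0:
--         return None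
--     return l[start:start + max + 1]
-- ===== SOURCE B (Python) =====
-- def seq_real(l):
--     # Two-pass: split into maximal runs with strictly increasing real part, then pick the first longest.
--     runs = []
--     cur = []
--     for x in l:
--         if cur and not (cur[-1][0] < x[0]):
--             runs.append(cur)
--             cur = [x]
--         else:
--             cur.append(x)
--     if cur:
--         runs.append(cur)
--     best = []
--     for r in runs:
--         if len(r) > len(best):
--             best = r
--     if len(best) < 2:
--         return None
--     return best
-- ===== Notes on version B (the rewrite author's own statement) =====
-- stated objective: alternative
-- what changed: Replaces A's single index/counter scan (tracking i, start, max, m1 and slicing at the end) by a two-pass decomposition: split the list into maximal strictly-increasing runs as actual sublists, then a separate selection pass returns the first longest run (None if its length is below 2).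
import Mathlib
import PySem

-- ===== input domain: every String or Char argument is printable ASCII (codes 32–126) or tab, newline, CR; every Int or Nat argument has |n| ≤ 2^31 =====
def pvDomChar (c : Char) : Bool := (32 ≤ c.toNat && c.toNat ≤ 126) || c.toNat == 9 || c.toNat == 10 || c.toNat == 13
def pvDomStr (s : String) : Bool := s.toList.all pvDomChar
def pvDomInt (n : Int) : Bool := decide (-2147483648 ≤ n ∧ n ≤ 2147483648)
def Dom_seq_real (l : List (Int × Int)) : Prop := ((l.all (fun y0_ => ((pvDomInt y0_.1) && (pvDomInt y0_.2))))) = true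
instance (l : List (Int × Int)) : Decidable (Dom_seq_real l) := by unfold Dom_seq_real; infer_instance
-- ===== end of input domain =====

-- B splits the list into maximal strictly-increasing runs and then selects the first longest run,
-- instead of A's single index/counter scan with a final slice; objective: alternative decomposition.

-- ===== PORT A =====
-- A's while loop: state (i, start, max, m1); l[i] ported as pyGetD (always in range when read).
def loopA (l : List (Int × Int)) (i start mx m1 : Int) : Int × Int × Int × Int :=
  if h : i < (l.length : Int) - 1 then
    if (PySem.List.pyGetD l i (0, 0)).1 < (PySem.List.pyGetD l (i + 1) (0, 0)).1 then
      loopA l (i + 1) start mx (m1 + 1)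
    else
      if m1 > mx then loopA l (i + 1) (i - m1) m1 0
      else loopA l (i + 1) start mx 0
  else (i, start, mx, m1)
termination_by ((l.length : Int) - 1 - i).toNat
decreasing_by all_goals omega

def seq_real (l : List (Int × Int)) : Option (List (Int × Int)) :=
  let s := loopA l 0 0 0 0
  let i := s.1
  let start := if s.2.2.2 > s.2.2.1 then i - s.2.2.2 else s.2.1
  let mx := if s.2.2.2 > s.2.2.1 then s.2.2.2 else s.2.2.1
  if mx = 0 then none
  else some (PySem.List.slice l (some start) (some (start + mx + 1)))

-- ===== PORT B =====
-- Source B's first loop: split into runs (state (runs, cur)); cur[-1] ported as pyGetD cur (-1).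
def stepB (s : List (List (Int × Int)) × List (Int × Int)) (x : Int × Int) :
    List (List (Int × Int)) × List (Int × Int) :=
  if s.2 ≠ [] ∧ ¬ (PySem.List.pyGetD s.2 (-1) (0, 0)).1 < x.1 then (s.1 ++ [s.2], [x])
  else (s.1, s.2 ++ [x])

-- Source B's second loop: first run strictly longer than the best so far wins.
def pickB (best r : List (Int × Int)) : List (Int × Int) :=
  if r.length > best.length then r else best

def seq_real_alt (l : List (Int × Int)) : Option (List (Int × Int)) :=
  let s := l.foldl stepB ([], [])
  let runs := if s.2 ≠ [] then s.1 ++ [s.2] else s.1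
  let best := runs.foldl pickB []
  if best.length < 2 then none else some best

-- ===== PRECONDITION & SPEC =====
def Spec_seq_real (l : List (Int × Int)) (out : Option (List (Int × Int))) : Prop := out = seq_real_alt l
instance (l : List (Int × Int)) (out : Option (List (Int × Int))) : Decidable (Spec_seq_real l out) := by unfold Spec_seq_real; infer_instance

-- ===== CLAIM (what is proved, stated in full; the proofs are below) =====
def Claim_equal_seq_real : Prop := ∀ (l : List (Int × Int)), Dom_seq_real l → Spec_seq_real l (seq_real l)

-- ===== LEMMAS AND PROOFS =====

-- proof-side structural version of A's while loop (recursion on the remaining suffix)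
def scanA (prev : Int × Int) (xs : List (Int × Int)) (i st mx m1 : Int) : Int × Int × Int × Int :=
  match xs with
  | [] => (i, st, mx, m1)
  | x :: xs' =>
    if prev.1 < x.1 then scanA x xs' (i + 1) st mx (m1 + 1)
    else
      if m1 > mx then scanA x xs' (i + 1) (i - m1) m1 0
      else scanA x xs' (i + 1) st mx 0

def finA (l : List (Int × Int)) (r : Int × Int × Int × Int) : Option (List (Int × Int)) :=
  let start := if r.2.2.2 > r.2.2.1 then r.1 - r.2.2.2 else r.2.1
  let mx := if r.2.2.2 > r.2.2.1 then r.2.2.2 else r.2.2.1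
  if mx = 0 then none else some (PySem.List.slice l (some start) (some (start + mx + 1)))

def finB (s : List (List (Int × Int)) × List (Int × Int)) : Option (List (Int × Int)) :=
  let runs := if s.2 ≠ [] then s.1 ++ [s.2] else s.1
  let best := runs.foldl pickB []
  if best.length < 2 then none else some best

lemma seq_real_eq_finA (l : List (Int × Int)) : seq_real l = finA l (loopA l 0 0 0 0) := rfl
lemma seq_real_alt_eq_finB (l : List (Int × Int)) : seq_real_alt l = finB (l.foldl stepB ([], [])) := rfl

-- bridge: A's index loop over l = pre ++ prev :: xs, at i = pre.length, is the structural scan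
lemma loopA_eq_scanA (xs : List (Int × Int)) : ∀ (pre : List (Int × Int)) (prev : Int × Int) (st mx m1 : Int),
    loopA (pre ++ prev :: xs) (pre.length : Int) st mx m1 = scanA prev xs (pre.length : Int) st mx m1 := by
  induction xs with
  | nil =>
    intro pre prev st mx m1
    rw [loopA]
    have h : ¬ ((pre.length : Int) < ((pre ++ [prev]).length : Int) - 1) := by
      simp only [List.length_append, List.length_cons, List.length_nil]; push_cast; omega
    simp [scanA]
  | cons x xs' ih =>
    intro pre prev st mx m1
    have hp : PySem.List.pyGetD (pre ++ prev :: x :: xs') (pre.length : Int) (0, 0) = prev := by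
      simp [PySem.List.pyGetD]
    have hx : PySem.List.pyGetD (pre ++ prev :: x :: xs') ((pre.length : Int) + 1) (0, 0) = x := by
      have h2 : pre ++ prev :: x :: xs' = (pre ++ [prev]) ++ (x :: xs') := by simp
      have h1 : ((pre.length : Int) + 1) = (((pre ++ [prev]).length : Nat) : Int) := by
        simp only [List.length_append, List.length_cons, List.length_nil]; push_cast; ring
      rw [h2, h1, PySem.List.pyGetD, PySem.List.pyGet?_append_length]
      rfl
    rw [loopA]
    have hc : (pre.length : Int) < ((pre ++ prev :: x :: xs').length : Int) - 1 := by
      simp only [List.length_append, List.length_cons]; push_cast; omega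
    rw [dif_pos hc, hp, hx]
    have hre : ∀ st' mx' m1', loopA (pre ++ prev :: x :: xs') ((pre.length : Int) + 1) st' mx' m1' =
        scanA x xs' ((pre.length : Int) + 1) st' mx' m1' := by
      intro st' mx' m1'
      have h2 : pre ++ prev :: x :: xs' = (pre ++ [prev]) ++ x :: xs' := by simp
      have h1 : ((pre.length : Int) + 1) = (((pre ++ [prev]).length : Nat) : Int) := by
        simp only [List.length_append, List.length_cons, List.length_nil]; push_cast; ring
      rw [h2, h1, ih]
    by_cases h : prev.1 < x.1
    · simp only [if_pos h, scanA, hre]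
    · by_cases hm : m1 > mx <;> simp [h, hm, scanA, hre]

-- invariant tying A's (start, max) to B's running best
def RunInv (st mx : Int) (b l : List (Int × Int)) : Prop :=
  (mx = 0 ∧ b.length ≤ 1) ∨
  (1 ≤ mx ∧ (b.length : Int) = mx + 1 ∧ ∃ p s, l = p ++ b ++ s ∧ st = (p.length : Int))

lemma upd (st mx : Int) (b cur pre rest l : List (Int × Int)) (hInv : RunInv st mx b l)
    (hc : cur ≠ []) (hl : l = pre ++ cur ++ rest) :
    RunInv (if (cur.length : Int) - 1 > mx then (pre.length : Int) else st)
        (if (cur.length : Int) - 1 > mx then (cur.length : Int) - 1 else mx)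
        (pickB b cur) l := by
  have hc1 : 1 ≤ cur.length := List.length_pos_iff.mpr hc
  unfold pickB
  rcases hInv with ⟨h0, hb1⟩ | ⟨h1, hlen, p, s, hps, hst⟩
  · by_cases h : (cur.length : Int) - 1 > mx
    · have hgt : b.length < cur.length := by omega
      rw [if_pos h, if_pos h, if_pos hgt]
      exact Or.inr ⟨by omega, by omega, pre, rest, hl, rfl⟩
    · rw [if_neg h, if_neg h]
      by_cases h2 : cur.length > b.length
      · rw [if_pos h2]; exact Or.inl ⟨h0, by omega⟩
      · rw [if_neg h2]; exact Or.inl ⟨h0, hb1⟩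
  · by_cases h : (cur.length : Int) - 1 > mx
    · have hgt : b.length < cur.length := by omega
      rw [if_pos h, if_pos h, if_pos hgt]
      exact Or.inr ⟨by omega, by omega, pre, rest, hl, rfl⟩
    · have h2 : ¬ cur.length > b.length := by omega
      rw [if_neg h, if_neg h, if_neg h2]
      exact Or.inr ⟨h1, hlen, p, s, hps, hst⟩

lemma fin_eq (st mx : Int) (b l : List (Int × Int)) (hInv : RunInv st mx b l) :
    (if mx = 0 then none else some (PySem.List.slice l (some st) (some (st + mx + 1)))) =
    (if b.length < 2 then none else some b) := by
  rcases hInv with ⟨h0, hb1⟩ | ⟨h1, hlen, p, s, hps, hst⟩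
  · rw [if_pos h0, if_pos (by omega)]
  · rw [if_neg (by omega), if_neg (by omega)]
    rw [hst]
    have hb : (p.length : Int) + mx + 1 = (p.length : Int) + (b.length : Int) := by omega
    rw [hb, PySem.List.slice_natCast_add, hps]
    rw [List.append_assoc, List.drop_left, List.take_left]

-- the joint scan: A's structural loop vs B's run-splitting fold plus selection
lemma main_scan : ∀ (xs cur b : List (Int × Int)) (runs : List (List (Int × Int)))
    (prev : Int × Int) (pre l : List (Int × Int)) (st mx m1 i : Int),
    cur ≠ [] →
    PySem.List.pyGetD cur (-1) (0, 0) = prev →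
    m1 = (cur.length : Int) - 1 →
    i = (pre.length : Int) + m1 →
    l = pre ++ cur ++ xs →
    runs.foldl pickB [] = b →
    RunInv st mx b l →
    finA l (scanA prev xs i st mx m1) = finB (xs.foldl stepB (runs, cur)) := by
  intro xs
  induction xs with
  | nil =>
    intro cur b runs prev pre l st mx m1 i hc hprev hm1 hi hl hb hInv
    simp only [scanA, List.foldl_nil]
    have hupd := upd st mx b cur pre [] l hInv hc (by simpa using hl)
    have hfin := fin_eq _ _ _ l hupd
    have hA : finA l (i, st, mx, m1) =
        (if (if m1 > mx then m1 else mx) = 0 then none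
         else some (PySem.List.slice l (some (if m1 > mx then i - m1 else st))
           (some ((if m1 > mx then i - m1 else st) + (if m1 > mx then m1 else mx) + 1)))) := rfl
    have hB : finB (runs, cur) =
        (if (pickB b cur).length < 2 then none else some (pickB b cur)) := by
      unfold finB
      simp only [hc, ne_eq, not_false_iff, if_pos, List.foldl_append, List.foldl_cons,
        List.foldl_nil, hb]
    rw [hA, hB]
    have him : i - m1 = (pre.length : Int) := by omega
    rw [him]
    subst hm1
    exact hfin
  | cons x xs' ih =>
    intro cur b runs prev pre l st mx m1 i hc hprev hm1 hi hl hb hInv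
    simp only [List.foldl_cons]
    by_cases h : prev.1 < x.1
    · have hstep : stepB (runs, cur) x = (runs, cur ++ [x]) := by
        unfold stepB; simp [hprev, h]
      rw [hstep, scanA, if_pos h]
      exact ih (cur ++ [x]) b runs x pre l st mx (m1 + 1) (i + 1) (by simp)
        (by simp [pysem])
        (by simp only [List.length_append, List.length_cons, List.length_nil]; push_cast; omega)
        (by omega) (by rw [hl]; simp) hb hInv
    · have hstep : stepB (runs, cur) x = (runs ++ [cur], [x]) := by
        unfold stepB; simp [hc, hprev, h]
      rw [hstep, scanA, if_neg h]
      have hupd := upd st mx b cur pre (x :: xs') l hInv hc hl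
      have hl' : l = (pre ++ cur) ++ [x] ++ xs' := by rw [hl]; simp
      have hb' : (runs ++ [cur]).foldl pickB [] = pickB b cur := by
        rw [List.foldl_append, hb]; simp [pickB]
      have hlen' : ((pre ++ cur).length : Int) = i + 1 := by
        simp only [List.length_append]; push_cast; omega
      have him : i - m1 = (pre.length : Int) := by omega
      subst hm1
      have hcx : ([x] : List (Int × Int)) ≠ [] := by simp
      have hpx : PySem.List.pyGetD [x] (-1) (0, 0) = x := by
        simpa using PySem.List.pyGetD_neg_one (xs := [x]) hcx (d := ((0, 0) : Int × Int))
      have hm0 : (0 : Int) = (([x] : List (Int × Int)).length : Int) - 1 := by simp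
      have hi1 : i + 1 = (((pre ++ cur).length : Nat) : Int) + 0 := by omega
      by_cases hm : (cur.length : Int) - 1 > mx
      · rw [if_pos hm, him]
        rw [if_pos hm, if_pos hm] at hupd
        exact ih [x] (pickB b cur) (runs ++ [cur]) x (pre ++ cur) l (pre.length : Int)
          ((cur.length : Int) - 1) 0 (i + 1) hcx hpx hm0 hi1 hl' hb' hupd
      · rw [if_neg hm]
        rw [if_neg hm, if_neg hm] at hupd
        exact ih [x] (pickB b cur) (runs ++ [cur]) x (pre ++ cur) l st mx 0 (i + 1) hcx
          hpx hm0 hi1 hl' hb' hupd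

-- ===== VERDICT (by name: the statement is the Claim_ definition above) =====
theorem seq_real_spec : Claim_equal_seq_real := by
  intro l _
  unfold Spec_seq_real
  cases l with
  | nil =>
    rw [seq_real_eq_finA, seq_real_alt_eq_finB, loopA]
    norm_num [finA, finB]
  | cons y ys =>
    rw [seq_real_eq_finA, seq_real_alt_eq_finB]
    have h0 : loopA (y :: ys) 0 0 0 0 = scanA y ys 0 0 0 0 := by
      simpa using loopA_eq_scanA ys [] y 0 0 0
    have hstep : List.foldl stepB ([], []) (y :: ys) = List.foldl stepB ([], [y]) ys := by
      rw [List.foldl_cons]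
      have : stepB ([], []) y = ([], [y]) := by unfold stepB; simp
      rw [this]
    rw [h0, hstep]
    have hcy : ([y] : List (Int × Int)) ≠ [] := by simp
    exact main_scan ys [y] [] [] y [] (y :: ys) 0 0 0 0 hcy
      (by simpa using PySem.List.pyGetD_neg_one (xs := [y]) hcy (d := ((0, 0) : Int × Int)))
      (by simp) (by simp) (by simp) rfl (Or.inl ⟨rfl, by simp⟩)
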